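-- pv_equiv track=rewrite | github.com/aaaronmiller/datakiln | backend/app/services/query_optimizer.py | _is_valid_condition_syntax
-- ===== SOURCE A (Python) =====
-- def _is_valid_condition_syntax(condition: str) -> bool:
--     """Basic syntax validation for filter conditions."""
--     # Very basic validation - in practice this would be more sophisticated
--     if not condition.strip():
--         return False
--
--     # Check for balanced parentheses
--     paren_count = 0
--     for char in condition:
--         if char == '(':
--             paren_count += 1
--         elif char == ')':
--             paren_count -= 1
--             if paren_count < 0:
--                 return False
--
--     return paren_count == 0
-- ===== SOURCE B (Python) =====
-- def _is_valid_condition_syntax(condition: str) -> bool: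
--     """Basic syntax validation for filter conditions."""
--     if not condition.strip():
--         return False
--     deltas = [1 if ch == '(' else (-1 if ch == ')' else 0) for ch in condition]
--     prefix = []
--     total = 0
--     for d in deltas:
--         total += d
--         prefix.append(total)
--     return min(prefix) >= 0 and total == 0
-- ===== Notes on version B (the rewrite author's own statement) =====
-- stated objective: alternative
-- what changed: Replaces the fused single early-exit counter scan with a two-phase table approach: map each char to a +1/-1/0 delta, build the list of running prefix sums, then check min(prefix) >= 0 and total == 0.
import Mathlib
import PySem

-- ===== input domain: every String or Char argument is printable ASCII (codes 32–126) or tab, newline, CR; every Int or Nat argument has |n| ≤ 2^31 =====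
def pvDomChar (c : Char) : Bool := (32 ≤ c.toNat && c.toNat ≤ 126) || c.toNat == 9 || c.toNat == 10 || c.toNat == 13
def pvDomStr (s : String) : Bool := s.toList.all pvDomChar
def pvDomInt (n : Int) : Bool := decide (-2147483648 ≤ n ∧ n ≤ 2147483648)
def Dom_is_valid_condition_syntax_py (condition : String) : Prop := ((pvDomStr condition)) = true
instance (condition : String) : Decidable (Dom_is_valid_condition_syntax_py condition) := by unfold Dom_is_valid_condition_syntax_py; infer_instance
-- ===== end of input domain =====

-- B replaces A's fused early-exit counter scan by a two-phase delta-table/prefix-sum aggregation (alternative decomposition, same return value).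


-- ===== PORT A =====
-- A's for-loop with early return: 'none' = the early 'return False' inside the loop
def pvLoopA : List Char → Int → Option Int
  | [], c => some c
  | ch :: rest, c =>
    if ch = '(' then pvLoopA rest (c + 1)
    else if ch = ')' then
      if c - 1 < 0 then none else pvLoopA rest (c - 1)
    else pvLoopA rest c

def is_valid_condition_syntax_py (condition : String) : Bool :=
  if PySem.Str.strip condition = "" then false
  else
    match pvLoopA condition.toList 0 with
    | none => false
    | some r => decide (r = 0)

-- ===== PORT B =====
def pvDelta (ch : Char) : Int := if ch = '(' then 1 else if ch = ')' then -1 else 0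

def is_valid_condition_syntax_py_alt (condition : String) : Bool :=
  if PySem.Str.strip condition = "" then false
  else
    let deltas := condition.toList.map pvDelta
    -- the prefix-sum building loop: state = (prefix list so far, running total)
    let st := deltas.foldl (fun (acc : List Int × Int) d => (acc.1 ++ [acc.2 + d], acc.2 + d)) ([], 0)
    -- Python's min(prefix) raises on []; unreachable here since condition is nonempty
    (match PySem.List.min? st.1 (fun x => x) with
     | some m => decide (0 ≤ m)
     | none => false) && decide (st.2 = 0)

-- ===== PRECONDITION & SPEC =====
def Spec_is_valid_condition_syntax_py (condition : String) (out : Bool) : Prop := out = is_valid_condition_syntax_py_alt condition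
instance (condition : String) (out : Bool) : Decidable (Spec_is_valid_condition_syntax_py condition out) := by unfold Spec_is_valid_condition_syntax_py; infer_instance

-- ===== CLAIM (what is proved, stated in full; the proofs are below) =====
def Claim_equal_is_valid_condition_syntax_py : Prop := ∀ (condition : String), Dom_is_valid_condition_syntax_py condition → Spec_is_valid_condition_syntax_py condition (is_valid_condition_syntax_py condition)

-- ===== LEMMAS AND PROOFS =====

-- the prefix sums of the deltas of l starting from running total c
def pvSpre : List Char → Int → List Int
  | [], _ => []
  | ch :: rest, c => (c + pvDelta ch) :: pvSpre rest (c + pvDelta ch)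

theorem pvForall_cons (a : Int) (t : List Int) (ha : 0 ≤ a) :
    (∀ x ∈ a :: t, 0 ≤ x) ↔ (∀ x ∈ t, 0 ≤ x) := by
  constructor
  · intro h x hx
    exact h x (List.mem_cons_of_mem a hx)
  · intro h x hx
    rcases List.mem_cons.mp hx with rfl | hx
    · exact ha
    · exact h x hx

theorem pvFoldl_spre (l : List Char) : ∀ (acc : List Int) (c : Int),
    (l.map pvDelta).foldl (fun (acc : List Int × Int) d => (acc.1 ++ [acc.2 + d], acc.2 + d)) (acc, c)
      = (acc ++ pvSpre l c, (pvSpre l c).getLastD c) := by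
  induction l with
  | nil => intro acc c; simp [pvSpre]
  | cons ch rest ih =>
    intro acc c
    simp only [List.map_cons, List.foldl_cons, pvSpre, ih, List.append_assoc,
      List.singleton_append, List.getLastD_cons]

theorem pvMain (l : List Char) : ∀ (c : Int), 0 ≤ c →
    (match pvLoopA l c with
     | none => false
     | some r => decide (r = 0))
    = (decide (∀ x ∈ pvSpre l c, 0 ≤ x) && decide ((pvSpre l c).getLastD c = 0)) := by
  induction l with
  | nil => intro c _; simp [pvLoopA, pvSpre]
  | cons ch rest ih =>
    intro c hc
    by_cases h1 : ch = '('
    · have hd : pvDelta ch = 1 := by simp [pvDelta, h1]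
      simp only [pvLoopA, pvSpre, if_pos h1, hd]
      rw [ih (c + 1) (by omega), List.getLastD_cons,
        decide_eq_decide.mpr (pvForall_cons (c + 1) (pvSpre rest (c + 1)) (by omega))]
    · by_cases h2 : ch = ')'
      · have hd : pvDelta ch = -1 := by simp [pvDelta, h2]
        simp only [pvLoopA, pvSpre, if_neg h1, if_pos h2, hd]
        by_cases h0 : c - 1 < 0
        · simp only [if_pos h0]
          simp
          intro h1c
          omega
        · have he : c + -1 = c - 1 := by ring
          simp only [if_neg h0, he]
          rw [ih (c - 1) (by omega), List.getLastD_cons,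
            decide_eq_decide.mpr (pvForall_cons (c - 1) (pvSpre rest (c - 1)) (by omega))]
      · have hd : pvDelta ch = 0 := by simp [pvDelta, h1, h2]
        simp only [pvLoopA, pvSpre, if_neg h1, if_neg h2, hd, add_zero]
        rw [ih c hc, List.getLastD_cons,
          decide_eq_decide.mpr (pvForall_cons c (pvSpre rest c) hc)]

theorem pvMin_char (l : List Int) (h : l ≠ []) :
    (match PySem.List.min? l (fun x => x) with
     | some m => decide (0 ≤ m)
     | none => false) = decide (∀ x ∈ l, 0 ≤ x) := by
  cases hm : PySem.List.min? l (fun x => x) with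
  | none => exact absurd ((PySem.List.min?_eq_none_iff l (fun x => x)).mp hm) h
  | some m =>
    have hmem := PySem.List.min?_mem hm
    have hmin := PySem.List.min?_isMin hm
    simp only []
    by_cases h0 : 0 ≤ m
    · rw [decide_eq_true h0]
      symm
      rw [decide_eq_true_iff]
      intro x hx
      exact le_trans h0 (hmin x hx)
    · rw [decide_eq_false h0]
      symm
      rw [decide_eq_false_iff_not]
      intro hall
      exact h0 (hall m hmem)

theorem pvSpre_ne_nil (l : List Char) (c : Int) (h : l ≠ []) : pvSpre l c ≠ [] := by
  cases l with
  | nil => exact absurd rfl h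
  | cons a t => simp [pvSpre]

theorem pvStrip_empty (s : String) (h : s.toList = []) : PySem.Str.strip s = "" := by
  have hs : s = "" := String.toList_inj.mp (by simp [h])
  rw [hs]
  decide

theorem is_valid_condition_syntax_py_spec : Claim_equal_is_valid_condition_syntax_py := by
  intro condition _
  unfold Spec_is_valid_condition_syntax_py is_valid_condition_syntax_py is_valid_condition_syntax_py_alt
  by_cases hs : PySem.Str.strip condition = ""
  · simp [hs]
  · simp only [if_neg hs]
    have hne : condition.toList ≠ [] := fun h => hs (pvStrip_empty condition h)
    rw [pvFoldl_spre condition.toList [] 0]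
    simp only [List.nil_append]
    rw [pvMin_char _ (pvSpre_ne_nil _ _ hne)]
    exact pvMain condition.toList 0 le_rfl
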